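-- pv_equiv track=rewrite | github.com/martydill/Wizardry-6-reverse-engineering | tools/map_analyzer.py | get_map_info
-- ===== SOURCE A (Python) =====
-- def get_map_info(index):
--     # Hypothesis: Maps 0-9 are 20x20, Map 10 is 16x16, Maps 11-15 are 20x20
--     w = 20
--     h = 20
--     if index == 10:
--         w, h = 16, 16
--
--     # Calculate start cell
--     start_cell = 0
--     for i in range(index):
--         if i == 10:
--             start_cell += 16 * 16
--         else:
--             start_cell += 20 * 20
--
--     return start_cell, w, h
-- ===== SOURCE B (Python) =====
-- def get_map_info(index):
--     # Closed form: every prior map contributes 400 cells except map 10 (256),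
--     # and map 10 is among the priors only when index > 10.
--     start_cell = 0 if index <= 0 else 400 * index - (144 if index > 10 else 0)
--     if index == 10:
--         return start_cell, 16, 16
--     return start_cell, 20, 20
-- ===== Notes on version B (the rewrite author's own statement) =====
-- stated objective: faster
-- what changed: Replaced the O(index) accumulation loop over range(index) with a single closed-form arithmetic expression (400*index minus a 144 correction when index > 10).
import Mathlib
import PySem

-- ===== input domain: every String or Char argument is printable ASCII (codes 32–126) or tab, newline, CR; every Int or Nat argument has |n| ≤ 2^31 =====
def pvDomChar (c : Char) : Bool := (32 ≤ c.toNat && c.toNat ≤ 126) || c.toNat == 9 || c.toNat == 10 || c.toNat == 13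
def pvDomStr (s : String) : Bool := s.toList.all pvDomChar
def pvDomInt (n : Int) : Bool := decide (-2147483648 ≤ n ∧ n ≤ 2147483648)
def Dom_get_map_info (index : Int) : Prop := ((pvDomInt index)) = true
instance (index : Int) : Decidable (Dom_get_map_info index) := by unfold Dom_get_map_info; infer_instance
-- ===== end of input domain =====

-- B replaces A's O(index) accumulation loop by a closed-form O(1) expression.

-- ===== PORT A =====
def get_map_info (index : Int) : Int × Int × Int :=
  let wh : Int × Int := if index == 10 then (16, 16) else (20, 20)
  let start_cell : Int :=
    (PySem.List.pyRange 0 index 1).foldl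
      (fun acc i => if i == 10 then acc + 16 * 16 else acc + 20 * 20) 0
  (start_cell, wh.1, wh.2)

-- ===== PORT B =====
def get_map_info_alt (index : Int) : Int × Int × Int :=
  let start_cell : Int :=
    if index ≤ 0 then 0 else 400 * index - (if index > 10 then 144 else 0)
  if index == 10 then (start_cell, 16, 16) else (start_cell, 20, 20)

-- ===== PRECONDITION & SPEC =====
def Spec_get_map_info (index : Int) (out : Int × Int × Int) : Prop := out = get_map_info_alt index
instance (index : Int) (out : Int × Int × Int) : Decidable (Spec_get_map_info index out) := by unfold Spec_get_map_info; infer_instance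

-- ===== CLAIM (what is proved, stated in full; the proofs are below) =====
def Claim_equal_get_map_info : Prop := ∀ (index : Int), Dom_get_map_info index → Spec_get_map_info index (get_map_info index)

-- ===== LEMMAS AND PROOFS =====

theorem pv_fold_closed (n : Nat) :
    (PySem.List.pyRange 0 (n : Int) 1).foldl
      (fun acc i => if i == 10 then acc + 16 * 16 else acc + 20 * 20) 0
    = 400 * (n : Int) - (if (n : Int) > 10 then 144 else 0) := by
  induction n with
  | zero => simp [PySem.List.pyRange_one_eq_nil]
  | succ m ih =>
    have h : ((m : Int) + 1) = ((m + 1 : Nat) : Int) := by push_cast; ring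
    rw [show ((m + 1 : Nat) : Int) = (m : Int) + 1 by push_cast; ring,
        PySem.List.pyRange_one_succ_right (by positivity : (0:Int) ≤ (m : Int)),
        List.foldl_append, ih]
    simp only [List.foldl, beq_iff_eq]
    split_ifs <;> omega

theorem get_map_info_eq (index : Int) : get_map_info index = get_map_info_alt index := by
  unfold get_map_info get_map_info_alt
  by_cases hle : index ≤ 0
  · rw [PySem.List.pyRange_one_eq_nil hle]
    have : ¬ (index == 10) = true := by simp; omega
    simp [this, hle, List.foldl]
  · obtain ⟨n, hn⟩ : ∃ n : Nat, index = (n : Int) :=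
      ⟨index.toNat, (Int.toNat_of_nonneg (by omega)).symm⟩
    subst hn
    have h0 : n ≠ 0 := by omega
    rw [pv_fold_closed]
    simp only [beq_iff_eq]
    split_ifs <;> simp_all <;> omega

-- ===== VERDICT (by name: the statement is the Claim_ definition above) =====
theorem get_map_info_spec : Claim_equal_get_map_info := by
  intro index _
  exact get_map_info_eq index
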